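-- pv_equiv track=rewrite | github.com/springboardmentor969-cpu/AI-Agent-to-Test-Websites-Automatically-Using-Natural-Language2 | Milestone 4 - WebsiteTester/app.py | _extract_query_and_url
-- ===== SOURCE A (Python) =====
-- def _extract_query_and_url(steps):
--     query = ""
--     url = "https://www.google.com"
--     for s in steps:
--         if s.get("action") == "open_url":
--             url = s.get("url", url)
--         if s.get("action") == "search":
--             query = s.get("text", "")
--     return query, url
-- ===== SOURCE B (Python) =====
-- def _extract_query_and_url(steps):
--     url = next((s["url"] for s in reversed(steps)
--                 if s.get("action") == "open_url" and "url" in s),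
--                "https://www.google.com")
--     query = next((s.get("text", "") for s in reversed(steps)
--                   if s.get("action") == "search"),
--                  "")
--     return query, url
-- ===== Notes on version B (the rewrite author's own statement) =====
-- stated objective: idiomatic
-- what changed: Replaces the single forward overwriting loop by two backward searches with early termination (next over reversed(steps)), one per field; the 'url' in s guard reproduces A's default-chaining when a trailing open_url step lacks a url key.
import Mathlib
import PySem

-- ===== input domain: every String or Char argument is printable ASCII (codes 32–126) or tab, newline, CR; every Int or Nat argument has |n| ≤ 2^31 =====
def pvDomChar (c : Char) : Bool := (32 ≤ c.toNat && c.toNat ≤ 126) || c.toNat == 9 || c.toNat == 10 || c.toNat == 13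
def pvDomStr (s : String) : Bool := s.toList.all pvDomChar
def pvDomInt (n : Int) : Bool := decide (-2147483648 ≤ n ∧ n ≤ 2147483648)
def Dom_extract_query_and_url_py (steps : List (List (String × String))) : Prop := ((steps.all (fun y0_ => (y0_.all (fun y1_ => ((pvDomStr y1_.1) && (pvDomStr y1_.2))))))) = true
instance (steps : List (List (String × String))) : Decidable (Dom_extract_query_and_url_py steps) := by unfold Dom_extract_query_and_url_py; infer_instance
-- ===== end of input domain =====

-- B computes each field by a backward search with early termination (next over reversed steps)
-- instead of A's forward overwriting loop; return-value equivalence, no mutation involved.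


-- ===== PORT A =====
-- loop body of A: 'if action == open_url: url = s.get("url", url); if action == search: query = s.get("text", "")'
def pvStepA (acc : String × String) (s : List (String × String)) : String × String :=
  let url := if (PySem.Dict.mk s).get? "action" == some "open_url"
             then ((PySem.Dict.mk s).get? "url").getD acc.2 else acc.2
  let query := if (PySem.Dict.mk s).get? "action" == some "search"
               then ((PySem.Dict.mk s).get? "text").getD "" else acc.1
  (query, url)

def extract_query_and_url_py (steps : List (List (String × String))) : String × String :=
  steps.foldl pvStepA ("", "https://www.google.com")

-- ===== PORT B =====
def pvPredUrl (s : List (String × String)) : Bool :=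
  (PySem.Dict.mk s).get? "action" == some "open_url" && (PySem.Dict.mk s).contains "url"

def pvPredSearch (s : List (String × String)) : Bool :=
  (PySem.Dict.mk s).get? "action" == some "search"

def extract_query_and_url_py_alt (steps : List (List (String × String))) : String × String :=
  let url := ((steps.reverse.find? pvPredUrl).bind
                (fun s => (PySem.Dict.mk s).get? "url")).getD "https://www.google.com"
  let query := ((steps.reverse.find? pvPredSearch).map
                  (fun s => ((PySem.Dict.mk s).get? "text").getD "")).getD ""
  (query, url)

-- ===== PRECONDITION & SPEC =====
def Spec_extract_query_and_url_py (steps : List (List (String × String))) (out : String × String) : Prop := out = extract_query_and_url_py_alt steps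
instance (steps : List (List (String × String))) (out : String × String) : Decidable (Spec_extract_query_and_url_py steps out) := by unfold Spec_extract_query_and_url_py; infer_instance

-- ===== CLAIM (what is proved, stated in full; the proofs are below) =====
def Claim_equal_extract_query_and_url_py : Prop := ∀ (steps : List (List (String × String))), Dom_extract_query_and_url_py steps → Spec_extract_query_and_url_py steps (extract_query_and_url_py steps)

-- ===== LEMMAS AND PROOFS =====

-- one-step agreement for the url field: A's guarded getD-chaining equals B's guard (with the 'contains "url"' test)
lemma pvUrl_one (x : List (String × String)) (u0 : String) :
    ((if pvPredUrl x then some x else none).bind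
       (fun s => (PySem.Dict.mk s).get? "url")).getD u0 =
      (if (PySem.Dict.mk x).get? "action" == some "open_url"
       then ((PySem.Dict.mk x).get? "url").getD u0 else u0) := by
  simp only [pvPredUrl]
  by_cases hact : (PySem.Dict.mk x).get? "action" == some "open_url" <;>
    rcases hurl : (PySem.Dict.mk x).get? "url" with _ | v <;>
    simp_all [PySem.Dict.contains_eq_isSome_get?]

-- a step matched by B's url predicate carries a "url" key, so the default is irrelevant
lemma pvUrl_found (su : List (String × String)) (hsu : pvPredUrl su = true) (a b : String) :
    ((PySem.Dict.mk su).get? "url").getD a = ((PySem.Dict.mk su).get? "url").getD b := by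
  simp only [pvPredUrl, Bool.and_eq_true, PySem.Dict.contains_eq_isSome_get?] at hsu
  rcases h : (PySem.Dict.mk su).get? "url" with _ | v
  · rw [h] at hsu; simp at hsu
  · simp

-- the fold's two components are the backward first matches, with the accumulator as default
lemma pvFold_eq (xs : List (List (String × String))) (q0 u0 : String) :
    xs.foldl pvStepA (q0, u0) =
      (((xs.reverse.find? pvPredSearch).map
          (fun s => ((PySem.Dict.mk s).get? "text").getD "")).getD q0,
       ((xs.reverse.find? pvPredUrl).bind
          (fun s => (PySem.Dict.mk s).get? "url")).getD u0) := by
  induction xs generalizing q0 u0 with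
  | nil => simp
  | cons x xs ih =>
    simp only [List.foldl_cons, List.reverse_cons, List.find?_append, List.find?_singleton,
      pvStepA]
    rw [ih]
    rcases hq : xs.reverse.find? pvPredSearch with _ | sq <;>
    rcases hu : xs.reverse.find? pvPredUrl with _ | su <;>
      simp only [Option.none_or, Option.some_or, Option.map_some, Option.map_none,
        Option.bind_some, Option.bind_none, Option.getD_some, Option.getD_none,
        Prod.mk.injEq]
    · refine ⟨?_, (pvUrl_one x u0).symm⟩
      simp only [pvPredSearch]
      by_cases hact : (PySem.Dict.mk x).get? "action" == some "search" <;> simp [hact]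
    · refine ⟨?_, pvUrl_found su (List.find?_some hu) _ _⟩
      simp only [pvPredSearch]
      by_cases hact : (PySem.Dict.mk x).get? "action" == some "search" <;> simp [hact]
    · exact ⟨trivial, (pvUrl_one x u0).symm⟩
    · exact ⟨trivial, pvUrl_found su (List.find?_some hu) _ _⟩

-- ===== VERDICT (by name: the statement is the Claim_ definition above) =====
theorem extract_query_and_url_py_spec : Claim_equal_extract_query_and_url_py := by
  intro steps _
  unfold Spec_extract_query_and_url_py extract_query_and_url_py extract_query_and_url_py_alt
  rw [pvFold_eq]
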